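-- pv_equiv track=rewrite | github.com/SDeBeukeleer/momentum | scripts/generate_v5_tile.py | get_reference_day
-- ===== SOURCE A (Python) =====
-- def get_reference_day(day: int) -> int:
--     """Get the best reference image day for a given day - mirrors glass bell approach."""
--     # Use closest lower milestone as reference
--     milestones = [1, 25, 50, 75, 100, 140, 200]
--
--     for i, m in enumerate(milestones):
--         if day <= m:
--             if i == 0:
--                 return None  # No reference for day 1
--             return milestones[i-1]
--     return milestones[-2]  # Use 140 for anything beyond
-- ===== SOURCE B (Python) =====
-- def get_reference_day(day: int) -> int:
--     """Closest lower milestone reference day, as filter-then-max over candidates.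
--
--     200 is deliberately absent: the original never returns it (days beyond 140
--     all reference 140), and days <= 1 have no reference (None).
--     """
--     candidates = [1, 25, 50, 75, 100, 140]
--     return max((c for c in candidates if c < day), default=None)
-- ===== Notes on version B (the rewrite author's own statement) =====
-- stated objective: simpler
-- what changed: Replaced the forward enumerate scan for the first milestone >= day (returning the previous one by index, with a fallthrough to milestones[-2]) by a filter-then-max over the candidate list [1,25,50,75,100,140]: the answer is the largest candidate strictly below day, None if there is none.
import Mathlib
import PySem

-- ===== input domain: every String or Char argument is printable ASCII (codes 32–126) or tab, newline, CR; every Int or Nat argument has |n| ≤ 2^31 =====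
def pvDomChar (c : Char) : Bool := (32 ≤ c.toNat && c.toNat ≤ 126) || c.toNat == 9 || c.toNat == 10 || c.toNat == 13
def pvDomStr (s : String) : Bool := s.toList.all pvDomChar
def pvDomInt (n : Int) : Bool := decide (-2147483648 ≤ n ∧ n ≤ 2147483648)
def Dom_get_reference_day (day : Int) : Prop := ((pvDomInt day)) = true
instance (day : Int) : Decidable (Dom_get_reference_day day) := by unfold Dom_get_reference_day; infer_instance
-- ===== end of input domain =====

-- B replaces A's forward enumerate scan (first milestone >= day, return the previous by index)
-- with filter-then-max over [1,25,50,75,100,140]; return values are identical on all ints.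

-- ===== PORT A =====
-- the for-loop over enumerate(milestones): first (i, m) with day <= m decides the result
def pvALoop (day : Int) (milestones : List Int) : List (Int × Int) → Option Int
  | [] => PySem.List.pyGet? milestones (-2)   -- return milestones[-2]
  | (i, m) :: rest =>
      if day ≤ m then
        if i = 0 then none
        else PySem.List.pyGet? milestones (i - 1)
      else pvALoop day milestones rest

def get_reference_day (day : Int) : Option Int :=
  let milestones : List Int := [1, 25, 50, 75, 100, 140, 200]
  pvALoop day milestones (PySem.List.enumerate milestones)

-- ===== PORT B =====
def get_reference_day_alt (day : Int) : Option Int :=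
  let candidates : List Int := [1, 25, 50, 75, 100, 140]
  PySem.List.max? (candidates.filter (fun c => c < day)) (fun x => x)

-- ===== PRECONDITION & SPEC =====
def Spec_get_reference_day (day : Int) (out : Option Int) : Prop := out = get_reference_day_alt day
instance (day : Int) (out : Option Int) : Decidable (Spec_get_reference_day day out) := by unfold Spec_get_reference_day; infer_instance

-- ===== CLAIM (what is proved, stated in full; the proofs are below) =====
def Claim_equal_get_reference_day : Prop := ∀ (day : Int), Dom_get_reference_day day → Spec_get_reference_day day (get_reference_day day)

-- ===== LEMMAS AND PROOFS =====

-- ===== VERDICT (by name: the statement is the Claim_ definition above) =====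
theorem get_reference_day_spec : Claim_equal_get_reference_day := by
  intro day _
  unfold Spec_get_reference_day get_reference_day get_reference_day_alt
  by_cases h1 : day ≤ 1
  · simp [pvALoop, PySem.List.enumerate, PySem.List.max?, PySem.List.pyGet?, PySem.List.pyIdx?, h1, show ¬(1 < day) by omega, show ¬(25 < day) by omega, show ¬(50 < day) by omega, show ¬(75 < day) by omega, show ¬(100 < day) by omega, show ¬(140 < day) by omega]
  · by_cases h2 : day ≤ 25
    · simp [pvALoop, PySem.List.enumerate, PySem.List.max?, PySem.List.pyGet?, PySem.List.pyIdx?, h1, h2, show (1 < day) by omega, show ¬(25 < day) by omega, show ¬(50 < day) by omega, show ¬(75 < day) by omega, show ¬(100 < day) by omega, show ¬(140 < day) by omega]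
    · by_cases h3 : day ≤ 50
      · simp [pvALoop, PySem.List.enumerate, PySem.List.max?, PySem.List.pyGet?, PySem.List.pyIdx?, h1, h2, h3, show (1 < day) by omega, show (25 < day) by omega, show ¬(50 < day) by omega, show ¬(75 < day) by omega, show ¬(100 < day) by omega, show ¬(140 < day) by omega]
      · by_cases h4 : day ≤ 75
        · simp [pvALoop, PySem.List.enumerate, PySem.List.max?, PySem.List.pyGet?, PySem.List.pyIdx?, h1, h2, h3, h4, show (1 < day) by omega, show (25 < day) by omega, show (50 < day) by omega, show ¬(75 < day) by omega, show ¬(100 < day) by omega, show ¬(140 < day) by omega]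
        · by_cases h5 : day ≤ 100
          · simp [pvALoop, PySem.List.enumerate, PySem.List.max?, PySem.List.pyGet?, PySem.List.pyIdx?, h1, h2, h3, h4, h5, show (1 < day) by omega, show (25 < day) by omega, show (50 < day) by omega, show (75 < day) by omega, show ¬(100 < day) by omega, show ¬(140 < day) by omega]
          · by_cases h6 : day ≤ 140
            · simp [pvALoop, PySem.List.enumerate, PySem.List.max?, PySem.List.pyGet?, PySem.List.pyIdx?, h1, h2, h3, h4, h5, h6, show (1 < day) by omega, show (25 < day) by omega, show (50 < day) by omega, show (75 < day) by omega, show (100 < day) by omega, show ¬(140 < day) by omega]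
            · by_cases h7 : day ≤ 200
              · simp [pvALoop, PySem.List.enumerate, PySem.List.max?, PySem.List.pyGet?, PySem.List.pyIdx?, h1, h2, h3, h4, h5, h6, h7, show (1 < day) by omega, show (25 < day) by omega, show (50 < day) by omega, show (75 < day) by omega, show (100 < day) by omega, show (140 < day) by omega]
              · simp [pvALoop, PySem.List.enumerate, PySem.List.max?, PySem.List.pyGet?, PySem.List.pyIdx?, h1, h2, h3, h4, h5, h6, h7, show (1 < day) by omega, show (25 < day) by omega, show (50 < day) by omega, show (75 < day) by omega, show (100 < day) by omega, show (140 < day) by omega]
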